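-- pv_equiv track=rewrite | github.com/jursmatsko/lotto-image-predictor-research | kle/image_predictor/utils/visualization.py | compare_prediction_ascii
-- ===== SOURCE A (Python) =====
-- from typing import List, Optional, Tuple
--
-- def compare_prediction_ascii(
--
--     predicted: List[int],
--     actual: List[int],
--     width: int = 10,
--     height: int = 8,
-- ) -> str:
--     """
--     Compare predicted vs actual numbers in ASCII.
--
--     Legend:
--     - ██ : Hit (predicted and actual)
--     - ▓▓ : Miss (predicted but not actual)
--     - ░░ : Not predicted, not actual
--     - ▒▒ : Not predicted, but actual (missed)
--     """
--     pred_set = set(predicted)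
--     actual_set = set(actual)
--
--     lines = []
--     lines.append("Legend: ██=Hit  ▓▓=FalsePos  ▒▒=FalseNeg  ░░=TrueNeg")
--     lines.append("")
--
--     header = "    " + " ".join(f"{i+1:2d}" for i in range(width))
--     lines.append(header)
--     lines.append("    " + "-" * (width * 3 - 1))
--
--     hits = 0
--     false_pos = 0
--     false_neg = 0
--
--     for r in range(height):
--         row_start = r * width + 1
--         row_end = row_start + width - 1
--         line = f"{row_start:2d}-{row_end:2d}|"
--
--         for c in range(width):
--             num = r * width + c + 1
--             in_pred = num in pred_set
--             in_actual = num in actual_set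
--
--             if in_pred and in_actual:
--                 line += " ██"
--                 hits += 1
--             elif in_pred and not in_actual:
--                 line += " ▓▓"
--                 false_pos += 1
--             elif not in_pred and in_actual:
--                 line += " ▒▒"
--                 false_neg += 1
--             else:
--                 line += " ░░"
--
--         lines.append(line)
--
--     lines.append("")
--     lines.append(f"Statistics: Hits={hits}/20  FalsePos={false_pos}  FalseNeg={false_neg}")
--
--     return "\n".join(lines)
-- ===== SOURCE B (Python) =====
-- def compare_prediction_ascii(predicted, actual, width=10, height=8):
--     pred_set = set(predicted)
--     actual_set = set(actual)
--
--     # Classify every cell once into a glyph table; both the picture and the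
--     # statistics are derived from it.
--     table = [
--         [(" ██" if n in actual_set else " ▓▓") if n in pred_set
--          else (" ▒▒" if n in actual_set else " ░░")
--          for n in range(r * width + 1, r * width + width + 1)]
--         for r in range(height)
--     ]
--     hits = sum(trow.count(" ██") for trow in table)
--     false_pos = sum(trow.count(" ▓▓") for trow in table)
--     false_neg = sum(trow.count(" ▒▒") for trow in table)
--
--     rows = [
--         f"{r * width + 1:2d}-{r * width + width:2d}|" + "".join(trow)
--         for r, trow in enumerate(table)
--     ]
--
--     return "\n".join(
--         ["Legend: ██=Hit  ▓▓=FalsePos  ▒▒=FalseNeg  ░░=TrueNeg",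
--          "",
--          "    " + " ".join(f"{i+1:2d}" for i in range(width)),
--          "    " + "-" * (width * 3 - 1)]
--         + rows
--         + ["",
--            f"Statistics: Hits={hits}/20  FalsePos={false_pos}  FalseNeg={false_neg}"])
-- ===== Notes on version B (the rewrite author's own statement) =====
-- stated objective: simpler
-- what changed: The three statistics are computed up front as sizes of set intersections/differences of pred and actual with the set of rendered cell numbers, instead of incrementing three counters inside the nested rendering loop, and each row is built as a join of per-cell glyphs rather than by string accumulation with interleaved counting.
import Mathlib
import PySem

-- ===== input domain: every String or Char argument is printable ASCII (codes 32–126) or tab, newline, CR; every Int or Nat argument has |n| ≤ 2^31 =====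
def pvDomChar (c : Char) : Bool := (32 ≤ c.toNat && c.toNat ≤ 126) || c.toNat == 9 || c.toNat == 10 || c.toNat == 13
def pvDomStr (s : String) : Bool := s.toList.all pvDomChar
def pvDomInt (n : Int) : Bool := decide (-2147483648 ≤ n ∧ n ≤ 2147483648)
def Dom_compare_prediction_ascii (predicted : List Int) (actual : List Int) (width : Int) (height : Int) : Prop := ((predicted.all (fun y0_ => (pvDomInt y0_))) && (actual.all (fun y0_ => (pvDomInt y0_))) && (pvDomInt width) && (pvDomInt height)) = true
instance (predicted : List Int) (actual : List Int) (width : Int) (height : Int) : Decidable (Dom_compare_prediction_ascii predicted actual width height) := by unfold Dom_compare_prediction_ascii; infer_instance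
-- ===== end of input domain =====

-- B classifies every cell once into a glyph table and derives both the picture (rows are joins
-- of the table's rows) and the statistics (glyph counts over the table) from it, instead of
-- threading three counters through the nested rendering loop (objective: alternative
-- decomposition; same asymptotic cost).

-- shared port of the Python f-string primitive f"{n:2d}" (str(n) right-padded to width 2 with spaces)
def pvFmt2 (n : Int) : List Char :=
  let ds := PySem.Int.toChars n
  if ds.length < 2 then ' ' :: ds else ds

-- ===== PORT A =====
-- body of A's inner 'for c in range(width)' loop (state: line, hits, false_pos, false_neg)
def pvStepCellA (pred_set actual_set : PySem.Set Int) (r width : Int)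
    (st : List Char × Int × Int × Int) (c : Int) : List Char × Int × Int × Int :=
  let (line, hits, false_pos, false_neg) := st
  let num := r * width + c + 1
  let in_pred := PySem.Set.contains pred_set num
  let in_actual := PySem.Set.contains actual_set num
  if in_pred && in_actual then (line ++ " ██".toList, hits + 1, false_pos, false_neg)
  else if in_pred && !in_actual then (line ++ " ▓▓".toList, hits, false_pos + 1, false_neg)
  else if !in_pred && in_actual then (line ++ " ▒▒".toList, hits, false_pos, false_neg + 1)
  else (line ++ " ░░".toList, hits, false_pos, false_neg)

-- body of A's outer 'for r in range(height)' loop (state: lines, hits, false_pos, false_neg)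
def pvStepRowA (pred_set actual_set : PySem.Set Int) (width : Int)
    (st : List (List Char) × Int × Int × Int) (r : Int) : List (List Char) × Int × Int × Int :=
  let (lines, hits, false_pos, false_neg) := st
  let row_start := r * width + 1
  let row_end := row_start + width - 1
  let line := pvFmt2 row_start ++ ['-'] ++ pvFmt2 row_end ++ ['|']
  let st2 := (PySem.List.pyRange 0 width 1).foldl (pvStepCellA pred_set actual_set r width)
      (line, hits, false_pos, false_neg)
  (lines ++ [st2.1], st2.2.1, st2.2.2.1, st2.2.2.2)

def compare_prediction_ascii (predicted : List Int) (actual : List Int) (width : Int) (height : Int) : String :=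
  let pred_set : PySem.Set Int := PySem.Set.ofList predicted
  let actual_set : PySem.Set Int := PySem.Set.ofList actual
  let lines : List (List Char) := ["Legend: ██=Hit  ▓▓=FalsePos  ▒▒=FalseNeg  ░░=TrueNeg".toList, []]
  let header := "    ".toList ++ PySem.Chars.join [' '] ((PySem.List.pyRange 0 width 1).map (fun i => pvFmt2 (i + 1)))
  let lines := lines ++ [header]
  let lines := lines ++ ["    ".toList ++ PySem.List.pyRepeat ['-'] (width * 3 - 1)]
  let st := (PySem.List.pyRange 0 height 1).foldl (pvStepRowA pred_set actual_set width) (lines, 0, 0, 0)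
  let lines := st.1 ++ [[], "Statistics: Hits=".toList ++ PySem.Int.toChars st.2.1 ++ "/20  FalsePos=".toList ++ PySem.Int.toChars st.2.2.1 ++ "  FalseNeg=".toList ++ PySem.Int.toChars st.2.2.2]
  String.ofList (PySem.Chars.join ['\n'] lines)

-- ===== PORT B =====
-- B's inline conditional expression classifying cell n into its (space-prefixed) glyph
def pvGlyphB (pred_set actual_set : PySem.Set Int) (n : Int) : List Char :=
  if PySem.Set.contains pred_set n then
    (if PySem.Set.contains actual_set n then " ██".toList else " ▓▓".toList)
  else
    (if PySem.Set.contains actual_set n then " ▒▒".toList else " ░░".toList)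

def compare_prediction_ascii_alt (predicted : List Int) (actual : List Int) (width : Int) (height : Int) : String :=
  let pred_set : PySem.Set Int := PySem.Set.ofList predicted
  let actual_set : PySem.Set Int := PySem.Set.ofList actual
  let table : List (List (List Char)) :=
    (PySem.List.pyRange 0 height 1).map (fun r =>
      (PySem.List.pyRange (r * width + 1) (r * width + width + 1) 1).map (pvGlyphB pred_set actual_set))
  let hits : Int := (table.map (fun trow => PySem.List.count trow " ██".toList)).sum
  let false_pos : Int := (table.map (fun trow => PySem.List.count trow " ▓▓".toList)).sum
  let false_neg : Int := (table.map (fun trow => PySem.List.count trow " ▒▒".toList)).sum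
  let rows := (PySem.List.enumerate table 0).map (fun rt =>
    pvFmt2 (rt.1 * width + 1) ++ ['-'] ++ pvFmt2 (rt.1 * width + width) ++ ['|'] ++ rt.2.flatten)
  String.ofList (PySem.Chars.join ['\n']
    (["Legend: ██=Hit  ▓▓=FalsePos  ▒▒=FalseNeg  ░░=TrueNeg".toList, [],
      "    ".toList ++ PySem.Chars.join [' '] ((PySem.List.pyRange 0 width 1).map (fun i => pvFmt2 (i + 1))),
      "    ".toList ++ PySem.List.pyRepeat ['-'] (width * 3 - 1)]
     ++ rows
     ++ [[], "Statistics: Hits=".toList ++ PySem.Int.toChars hits ++ "/20  FalsePos=".toList ++ PySem.Int.toChars false_pos ++ "  FalseNeg=".toList ++ PySem.Int.toChars false_neg]))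

-- ===== PRECONDITION & SPEC =====
def Spec_compare_prediction_ascii (predicted : List Int) (actual : List Int) (width : Int) (height : Int) (out : String) : Prop := out = compare_prediction_ascii_alt predicted actual width height
instance (predicted : List Int) (actual : List Int) (width : Int) (height : Int) (out : String) : Decidable (Spec_compare_prediction_ascii predicted actual width height out) := by unfold Spec_compare_prediction_ascii; infer_instance

-- ===== CLAIM (what is proved, stated in full; the proofs are below) =====
def Claim_equal_compare_prediction_ascii : Prop := ∀ (predicted : List Int) (actual : List Int) (width : Int) (height : Int), Dom_compare_prediction_ascii predicted actual width height → Spec_compare_prediction_ascii predicted actual width height (compare_prediction_ascii predicted actual width height)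

-- ===== LEMMAS AND PROOFS =====

-- A's inner loop = glyph concatenation + three counts
theorem pvInnerFold (pred_set actual_set : PySem.Set Int) (r width : Int) (cs : List Int)
    (line : List Char) (h f g : Int) :
    cs.foldl (pvStepCellA pred_set actual_set r width) (line, h, f, g) =
      (line ++ (cs.map (fun c => pvGlyphB pred_set actual_set (r * width + c + 1))).flatten,
       h + (cs.countP (fun c => PySem.Set.contains pred_set (r * width + c + 1) && PySem.Set.contains actual_set (r * width + c + 1)) : Int),
       f + (cs.countP (fun c => PySem.Set.contains pred_set (r * width + c + 1) && !PySem.Set.contains actual_set (r * width + c + 1)) : Int),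
       g + (cs.countP (fun c => !PySem.Set.contains pred_set (r * width + c + 1) && PySem.Set.contains actual_set (r * width + c + 1)) : Int)) := by
  induction cs generalizing line h f g with
  | nil => simp
  | cons c cs ih =>
    rw [List.foldl_cons]
    simp only [List.map_cons, List.flatten_cons]
    by_cases hp : (r * width + c + 1) ∈ pred_set <;>
      by_cases ha : (r * width + c + 1) ∈ actual_set <;>
        simp [pvStepCellA, pvGlyphB, hp, ha, ih] <;> omega

-- A's outer loop = row lines + three counts over all grid cells
theorem pvOuterFold (pred_set actual_set : PySem.Set Int) (width : Int) (rs : List Int)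
    (lines : List (List Char)) (h f g : Int) :
    rs.foldl (pvStepRowA pred_set actual_set width) (lines, h, f, g) =
      (lines ++ rs.map (fun r =>
          pvFmt2 (r * width + 1) ++ ['-'] ++ pvFmt2 (r * width + 1 + width - 1) ++ ['|'] ++
            ((PySem.List.pyRange 0 width 1).map (fun c => pvGlyphB pred_set actual_set (r * width + c + 1))).flatten),
       h + ((rs.flatMap (fun r => (PySem.List.pyRange 0 width 1).map (fun c => r * width + c + 1))).countP
              (fun n => PySem.Set.contains pred_set n && PySem.Set.contains actual_set n) : Int),
       f + ((rs.flatMap (fun r => (PySem.List.pyRange 0 width 1).map (fun c => r * width + c + 1))).countP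
              (fun n => PySem.Set.contains pred_set n && !PySem.Set.contains actual_set n) : Int),
       g + ((rs.flatMap (fun r => (PySem.List.pyRange 0 width 1).map (fun c => r * width + c + 1))).countP
              (fun n => !PySem.Set.contains pred_set n && PySem.Set.contains actual_set n) : Int)) := by
  induction rs generalizing lines h f g with
  | nil => simp
  | cons r rs ih =>
    rw [List.foldl_cons]
    simp only [pvStepRowA, pvInnerFold]
    rw [ih]
    simp only [Prod.mk.injEq, List.map_cons, List.flatMap_cons, List.countP_append,
      List.countP_map, Function.comp_def]
    refine ⟨by simp, ?_, ?_, ?_⟩ <;> omega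

-- the cell numbers of row r, shifted range form = comprehension form
theorem pvShift (width r : Int) :
    (PySem.List.pyRange 0 width 1).map (fun c => r * width + c + 1) =
      PySem.List.pyRange (r * width + 1) (r * width + width + 1) 1 := by
  rw [PySem.List.pyRange_one, PySem.List.pyRange_one]
  rw [show r * width + width + 1 - (r * width + 1) = width - 0 from by ring]
  rw [List.map_map]
  refine List.map_congr_left fun k _ => ?_
  simp only [Function.comp_apply]
  omega

-- Python's enumerate of a list comprehension over range(s, h): index = range element
theorem pvEnumAux {α : Type} (f : Int → α) (n : Nat) : ∀ (s : Int),
    PySem.List.enumerate ((PySem.List.pyRange s (s + n) 1).map f) s =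
      (PySem.List.pyRange s (s + n) 1).map (fun r => (r, f r)) := by
  induction n with
  | zero => intro s; simp
  | succ m ih =>
    intro s
    rw [PySem.List.pyRange_one_cons (by push_cast; omega : s < s + ((m:Nat) + 1 : Nat))]
    rw [show s + ((m:Nat) + 1 : Nat) = (s + 1) + (m : Nat) from by push_cast; ring]
    simp only [List.map_cons, PySem.List.enumerate_cons, ih (s + 1)]

theorem pvEnumMapRange {α : Type} (f : Int → α) (h : Int) :
    PySem.List.enumerate ((PySem.List.pyRange 0 h 1).map f) 0 =
      (PySem.List.pyRange 0 h 1).map (fun r => (r, f r)) := by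
  by_cases hle : h ≤ 0
  · simp [PySem.List.pyRange_one_eq_nil hle]
  · have : h = 0 + ((h.toNat : Nat) : Int) := by omega
    rw [this]
    exact pvEnumAux f h.toNat 0

-- B's rows comprehension = A's rendered row lines
theorem pvRowsEq (pred_set actual_set : PySem.Set Int) (width height : Int) :
    (PySem.List.enumerate ((PySem.List.pyRange 0 height 1).map (fun r =>
        (PySem.List.pyRange (r * width + 1) (r * width + width + 1) 1).map (pvGlyphB pred_set actual_set))) 0).map
      (fun rt => pvFmt2 (rt.1 * width + 1) ++ ['-'] ++ pvFmt2 (rt.1 * width + width) ++ ['|'] ++ rt.2.flatten) =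
    (PySem.List.pyRange 0 height 1).map (fun r =>
      pvFmt2 (r * width + 1) ++ ['-'] ++ pvFmt2 (r * width + 1 + width - 1) ++ ['|'] ++
        ((PySem.List.pyRange 0 width 1).map (fun c => pvGlyphB pred_set actual_set (r * width + c + 1))).flatten) := by
  rw [pvEnumMapRange, List.map_map]
  refine List.map_congr_left fun r _ => ?_
  simp only [Function.comp_apply]
  rw [← pvShift, List.map_map]
  rw [show r * width + 1 + width - 1 = r * width + width from by ring]
  simp [Function.comp_def]

-- a sum of per-row counts = a countP over the concatenation of the rows' cell numbers
theorem pvSumCount (pred_set actual_set : PySem.Set Int) (width : Int) (g : List Char) (q : Int → Bool)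
    (hpt : ∀ n, (pvGlyphB pred_set actual_set n = g) ↔ q n = true) (rs : List Int) :
    (rs.map (fun r => PySem.List.count ((PySem.List.pyRange (r * width + 1) (r * width + width + 1) 1).map (pvGlyphB pred_set actual_set)) g)).sum =
      (rs.flatMap (fun r => (PySem.List.pyRange 0 width 1).map (fun c => r * width + c + 1))).countP q := by
  induction rs with
  | nil => simp
  | cons r rs ih =>
    simp only [List.map_cons, List.sum_cons, List.flatMap_cons, List.countP_append]
    have hrow : PySem.List.count ((PySem.List.pyRange (r * width + 1) (r * width + width + 1) 1).map (pvGlyphB pred_set actual_set)) g =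
        ((PySem.List.pyRange 0 width 1).map (fun c => r * width + c + 1)).countP q := by
      rw [← pvShift, List.map_map, PySem.List.count_eq, List.count_eq_countP, List.countP_map, List.countP_map]
      refine List.countP_congr fun c _ => ?_
      simp only [Function.comp_apply, beq_iff_eq]
      exact ⟨fun hc => (hpt _).mp hc, fun hc => (hpt _).mpr hc⟩
    rw [hrow, ih]

theorem pvHitsPt (pred_set actual_set : PySem.Set Int) (n : Int) :
    (pvGlyphB pred_set actual_set n = " ██".toList) ↔
      (PySem.Set.contains pred_set n && PySem.Set.contains actual_set n) = true := by
  by_cases hp : n ∈ pred_set <;> by_cases ha : n ∈ actual_set <;>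
    simp [pvGlyphB, hp, ha]

theorem pvFPPt (pred_set actual_set : PySem.Set Int) (n : Int) :
    (pvGlyphB pred_set actual_set n = " ▓▓".toList) ↔
      (PySem.Set.contains pred_set n && !PySem.Set.contains actual_set n) = true := by
  by_cases hp : n ∈ pred_set <;> by_cases ha : n ∈ actual_set <;>
    simp [pvGlyphB, hp, ha]

theorem pvFNPt (pred_set actual_set : PySem.Set Int) (n : Int) :
    (pvGlyphB pred_set actual_set n = " ▒▒".toList) ↔
      (!PySem.Set.contains pred_set n && PySem.Set.contains actual_set n) = true := by
  by_cases hp : n ∈ pred_set <;> by_cases ha : n ∈ actual_set <;>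
    simp [pvGlyphB, hp, ha]

theorem pvHitsSum (pred_set actual_set : PySem.Set Int) (width : Int) (rs : List Int) :
    (rs.map (fun r => PySem.List.count ((PySem.List.pyRange (r * width + 1) (r * width + width + 1) 1).map (pvGlyphB pred_set actual_set)) " ██".toList)).sum =
      (rs.flatMap (fun r => (PySem.List.pyRange 0 width 1).map (fun c => r * width + c + 1))).countP
        (fun n => PySem.Set.contains pred_set n && PySem.Set.contains actual_set n) :=
  pvSumCount pred_set actual_set width _ _ (pvHitsPt pred_set actual_set) rs

theorem pvFPSum (pred_set actual_set : PySem.Set Int) (width : Int) (rs : List Int) :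
    (rs.map (fun r => PySem.List.count ((PySem.List.pyRange (r * width + 1) (r * width + width + 1) 1).map (pvGlyphB pred_set actual_set)) " ▓▓".toList)).sum =
      (rs.flatMap (fun r => (PySem.List.pyRange 0 width 1).map (fun c => r * width + c + 1))).countP
        (fun n => PySem.Set.contains pred_set n && !PySem.Set.contains actual_set n) :=
  pvSumCount pred_set actual_set width _ _ (pvFPPt pred_set actual_set) rs

theorem pvFNSum (pred_set actual_set : PySem.Set Int) (width : Int) (rs : List Int) :
    (rs.map (fun r => PySem.List.count ((PySem.List.pyRange (r * width + 1) (r * width + width + 1) 1).map (pvGlyphB pred_set actual_set)) " ▒▒".toList)).sum =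
      (rs.flatMap (fun r => (PySem.List.pyRange 0 width 1).map (fun c => r * width + c + 1))).countP
        (fun n => !PySem.Set.contains pred_set n && PySem.Set.contains actual_set n) :=
  pvSumCount pred_set actual_set width _ _ (pvFNPt pred_set actual_set) rs

-- ===== VERDICT (by name: the statement is the Claim_ definition above) =====
theorem compare_prediction_ascii_spec : Claim_equal_compare_prediction_ascii := by
  intro predicted actual width height _
  unfold Spec_compare_prediction_ascii
  rw [compare_prediction_ascii, compare_prediction_ascii_alt]
  simp only [pvOuterFold, zero_add, List.map_map, Function.comp_def]
  rw [pvRowsEq, pvHitsSum, pvFPSum, pvFNSum]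
  simp only [List.append_assoc, List.cons_append, List.nil_append]
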